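-- pv_equiv track=rewrite | github.com/cfsilvia/Hormones_Prediction | treat_data.py | find_unique_features
-- ===== SOURCE A (Python) =====
-- def  find_unique_features(lists):
--    unique_lists = []
--    frequencies = []
--    indices_dict = {} #for storing the indices for each feature
--    seen = set()
--    for i, lst in enumerate(lists):
--      t=tuple(lst)
--      if t not in seen:
--        seen.add(t)
--        unique_lists.append(lst)
--        frequencies.append(1)
--        indices_dict[t] = [i]
--      else:
--        frequencies[unique_lists.index(lst)] += 1
--        indices_dict[t].append(i)
--    return unique_lists, frequencies, indices_dict
-- ===== SOURCE B (Python) =====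
-- def find_unique_features(lists):
--     indices_dict = {}
--     for i, lst in enumerate(lists):
--         indices_dict.setdefault(tuple(lst), []).append(i)
--     unique_lists = [list(t) for t in indices_dict]
--     frequencies = [len(idxs) for idxs in indices_dict.values()]
--     return unique_lists, frequencies, indices_dict
-- ===== Notes on version B (the rewrite author's own statement) =====
-- stated objective: simpler
-- what changed: Replaces A's four parallel accumulators (unique list, frequency list kept in sync via an inner unique_lists.index scan, dict, seen-set) with one grouping pass that only builds the index dict via setdefault, then derives unique_lists and frequencies from the dict afterwards.
import Mathlib
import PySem

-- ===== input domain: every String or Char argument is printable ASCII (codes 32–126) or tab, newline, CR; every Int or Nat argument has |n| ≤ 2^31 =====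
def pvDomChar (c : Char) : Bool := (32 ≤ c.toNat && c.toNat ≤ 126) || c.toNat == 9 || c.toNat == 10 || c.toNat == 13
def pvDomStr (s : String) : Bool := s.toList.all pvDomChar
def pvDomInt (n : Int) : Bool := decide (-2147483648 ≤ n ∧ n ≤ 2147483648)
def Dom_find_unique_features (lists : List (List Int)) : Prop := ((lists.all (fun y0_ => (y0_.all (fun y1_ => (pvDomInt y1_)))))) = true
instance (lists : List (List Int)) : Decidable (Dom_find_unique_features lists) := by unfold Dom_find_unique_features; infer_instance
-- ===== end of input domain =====

-- B replaces A's four parallel accumulators (unique list, frequency list updated via an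
-- inner unique_lists.index scan, dict, seen-set) with one grouping pass building only the
-- index dict, deriving unique_lists and frequencies from it afterwards (objective: simpler).

-- ===== PORT A =====
-- loop body of A: state = (unique_lists, frequencies, indices_dict, seen)
def pvStepA (st : List (List Int) × List Int × PySem.Dict (List Int) (List Int) × PySem.Set (List Int))
    (p : Int × List Int) :
    List (List Int) × List Int × PySem.Dict (List Int) (List Int) × PySem.Set (List Int) :=
  let t := p.2   -- t = tuple(lst); tuples and lists of ints are both List Int here
  if ¬ (PySem.Set.contains st.2.2.2 t) then
    (st.1 ++ [t], st.2.1 ++ [(1 : Int)], st.2.2.1.insert t [p.1], PySem.Set.add st.2.2.2 t)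
  else
    -- frequencies[unique_lists.index(lst)] += 1 ; index() cannot fail here (t ∈ seen),
    -- so the none branch is unreachable and leaves frequencies unchanged.
    (st.1,
     (match PySem.List.index? st.1 t with
      | some j => st.2.1.modify j (· + 1)
      | none => st.2.1),
     -- indices_dict[t].append(i): key exists, rewrite its list with i appended
     st.2.2.1.modify t [] (· ++ [p.1]),
     st.2.2.2)

def find_unique_features (lists : List (List Int)) : List (List Int) × List Int × (List (List Int × List Int)) :=
  let r := (PySem.List.enumerate lists 0).foldl pvStepA ([], [], PySem.Dict.empty, PySem.Set.empty)
  (r.1, r.2.1, r.2.2.1.items)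

-- ===== PORT B =====
-- indices_dict.setdefault(t, []).append(i)  ≡  d[t] = d.get(t, []) + [i]
def pvStepB (d : PySem.Dict (List Int) (List Int)) (p : Int × List Int) :
    PySem.Dict (List Int) (List Int) :=
  d.modify p.2 [] (· ++ [p.1])

def find_unique_features_alt (lists : List (List Int)) : List (List Int) × List Int × (List (List Int × List Int)) :=
  let d := (PySem.List.enumerate lists 0).foldl pvStepB PySem.Dict.empty
  (d.items.map (·.1), d.items.map (fun q => ((q.2.length : Int))), d.items)

-- ===== PRECONDITION & SPEC =====
def Spec_find_unique_features (lists : List (List Int)) (out : List (List Int) × List Int × (List (List Int × List Int))) : Prop := out = find_unique_features_alt lists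
instance (lists : List (List Int)) (out : List (List Int) × List Int × (List (List Int × List Int))) : Decidable (Spec_find_unique_features lists out) := by unfold Spec_find_unique_features; infer_instance

-- ===== CLAIM (what is proved, stated in full; the proofs are below) =====
def Claim_equal_find_unique_features : Prop := ∀ (lists : List (List Int)), Dom_find_unique_features lists → Spec_find_unique_features lists (find_unique_features lists)

-- ===== LEMMAS AND PROOFS =====

-- Set.contains over a dict's key list is the dict's contains
theorem pv_set_contains_keys (d : PySem.Dict (List Int) (List Int)) (x : List Int) :
    PySem.Set.contains (d.keys : PySem.Set (List Int)) x = d.contains x := by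
  rw [Bool.eq_iff_iff]
  simp [PySem.Set.contains, PySem.Dict.contains, PySem.Dict.keys, List.any_eq_true, List.mem_map]

-- updating the value at an existing (unique) key: keys unchanged, lengths bumped at index? position
theorem pv_upd (l : List (List Int × List Int)) (x : List Int) (i : Int)
    (hnd : (l.map (·.1)).Nodup) (hx : x ∈ l.map (·.1)) :
    (l.map (fun p => if (p.1 == x) = true then (x, p.2 ++ [i]) else p)).map (·.1) = l.map (·.1)
    ∧ ∃ j, PySem.List.index? (l.map (·.1)) x = some j ∧
        (l.map (fun p => if (p.1 == x) = true then (x, p.2 ++ [i]) else p)).map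
            (fun q => ((q.2.length : Int)))
          = (l.map (fun q => ((q.2.length : Int)))).modify j (· + 1) := by
  induction l with
  | nil => simp at hx
  | cons p tl ih =>
    simp only [List.map_cons, List.nodup_cons] at hnd
    by_cases hpx : p.1 = x
    · have htl : ∀ q ∈ tl, (q.1 == x) = false := by
        intro q hq
        have hne : q.1 ≠ x := by
          intro h
          apply hnd.1
          rw [hpx, ← h]
          exact List.mem_map_of_mem hq
        simpa using hne
      have hmap : tl.map (fun p => if (p.1 == x) = true then (x, p.2 ++ [i]) else p) = tl := by
        have := List.map_congr_left (l := tl)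
          (f := fun p => if (p.1 == x) = true then (x, p.2 ++ [i]) else p) (g := id)
          (by intro q hq; simp [htl q hq])
        simpa using this
      refine ⟨?_, 0, ?_, ?_⟩
      · rw [List.map_cons, hmap, List.map_cons, List.map_cons]
        congr 1
        simp [hpx]
      · rw [List.map_cons, hpx, PySem.List.index?_cons_self]
      · rw [List.map_cons, hmap, List.map_cons, List.map_cons, List.modify_zero_cons]
        congr 1
        simp [hpx]
    · have hx' : x ∈ tl.map (·.1) := by
        have hx2 : x = p.1 ∨ ∃ v, (x, v) ∈ tl := by simpa using hx
        rcases hx2 with h | ⟨v, hv⟩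
        · exact absurd h.symm hpx
        · exact List.mem_map.mpr ⟨(x, v), hv, rfl⟩
      obtain ⟨h1, j, h2, h3⟩ := ih hnd.2 hx'
      refine ⟨?_, j + 1, ?_, ?_⟩
      · simp only [List.map_cons]
        rw [h1]
        congr 1
        simp [hpx]
      · rw [List.map_cons, PySem.List.index?_cons_of_ne _ hpx, h2]
        rfl
      · simp only [List.map_cons]
        rw [h3, List.modify_succ_cons]
        congr 1
        simp [hpx]

-- one step of A, expressed through one step of B
theorem pv_step (d : PySem.Dict (List Int) (List Int)) (hnd : d.keys.Nodup) (i : Int) (x : List Int) :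
    pvStepA (d.items.map (·.1), d.items.map (fun q => ((q.2.length : Int))), d, (d.keys : PySem.Set (List Int))) (i, x)
      = ((pvStepB d (i, x)).items.map (·.1),
         (pvStepB d (i, x)).items.map (fun q => ((q.2.length : Int))),
         pvStepB d (i, x), ((pvStepB d (i, x)).keys : PySem.Set (List Int)))
    ∧ (pvStepB d (i, x)).keys.Nodup := by
  by_cases hc : d.contains x = true
  · -- key already present
    have hxk : x ∈ d.keys := (PySem.Dict.contains_iff_mem_keys d x).mp hc
    have hset : PySem.Set.contains (d.keys : PySem.Set (List Int)) x = true := by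
      rw [pv_set_contains_keys]; exact hc
    have hnd' : (d.items.map (·.1)).Nodup := by simpa [PySem.Dict.keys] using hnd
    have hins' : (pvStepB d (i, x)).items
        = d.items.map (fun p => if (p.1 == x) = true then (x, p.2 ++ [i]) else p) := by
      show (PySem.Dict.insert d x ((d.getD x []) ++ [i])).items = _
      rw [PySem.Dict.items_insert_of_contains d _ hc]
      apply List.map_congr_left
      intro p hp
      by_cases hpe : (p.1 == x) = true
      · have hpx1 : p.1 = x := by simpa using hpe
        have hmem : (x, p.2) ∈ d.items := by rw [← hpx1]; exact hp
        simp [hpe, PySem.Dict.getD_of_mem_items d hmem hnd]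
      · simp [hpe]
    obtain ⟨h1, j, h2, h3⟩ := pv_upd d.items x i hnd' (by simpa [PySem.Dict.keys] using hxk)
    have hkeys' : (pvStepB d (i, x)).keys = d.keys := by
      show (pvStepB d (i, x)).items.map (·.1) = d.items.map (·.1)
      rw [hins']; exact h1
    have h2' : List.idxOf? x (d.items.map (·.1)) = some j := by
      simpa using h2
    have hA : pvStepA (d.items.map (·.1), d.items.map (fun q => ((q.2.length : Int))), d, (d.keys : PySem.Set (List Int))) (i, x)
        = (d.items.map (·.1), (d.items.map (fun q => ((q.2.length : Int)))).modify j (· + 1),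
           d.modify x [] (· ++ [i]), (d.keys : PySem.Set (List Int))) := by
      simp [pvStepA, hxk, h2']
    refine ⟨?_, ?_⟩
    · rw [hA]
      refine Prod.ext ?_ (Prod.ext ?_ (Prod.ext rfl ?_))
      · show d.items.map (·.1) = (pvStepB d (i, x)).items.map (·.1)
        rw [hins', h1]
      · show (d.items.map (fun q => ((q.2.length : Int)))).modify j (· + 1)
            = (pvStepB d (i, x)).items.map (fun q => ((q.2.length : Int)))
        rw [hins', h3]
      · show (d.keys : PySem.Set (List Int)) = ((pvStepB d (i, x)).keys : PySem.Set (List Int))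
        rw [hkeys']
    · rw [hkeys']; exact hnd
  · -- fresh key
    have hc' : d.contains x = false := by simpa using hc
    have hset : PySem.Set.contains (d.keys : PySem.Set (List Int)) x = false := by
      rw [pv_set_contains_keys]; exact hc'
    have hins : pvStepB d (i, x) = d.insert x [i] := by
      show d.modify x [] (· ++ [i]) = _
      rw [PySem.Dict.modify, PySem.Dict.getD_of_not_contains d [] hc']
      simp
    have hitems := PySem.Dict.items_insert_of_not_contains d ([i]) hc'
    have hkeys := PySem.Dict.keys_insert_of_not_contains d ([i]) hc'
    have hxk' : x ∉ d.keys := fun h => hc ((PySem.Dict.contains_iff_mem_keys d x).mpr h)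
    have hA : pvStepA (d.items.map (·.1), d.items.map (fun q => ((q.2.length : Int))), d, (d.keys : PySem.Set (List Int))) (i, x)
        = (d.items.map (·.1) ++ [x], d.items.map (fun q => ((q.2.length : Int))) ++ [(1 : Int)],
           d.insert x [i], PySem.Set.add (d.keys : PySem.Set (List Int)) x) := by
      simp [pvStepA, hxk']
    refine ⟨?_, ?_⟩
    · rw [hA, hins]
      refine Prod.ext ?_ (Prod.ext ?_ (Prod.ext rfl ?_))
      · show d.items.map (·.1) ++ [x] = (d.insert x [i]).items.map (·.1)
        rw [hitems]; simp
      · show d.items.map (fun q => ((q.2.length : Int))) ++ [(1 : Int)]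
            = (d.insert x [i]).items.map (fun q => ((q.2.length : Int)))
        rw [hitems]; simp
      · show PySem.Set.add (d.keys : PySem.Set (List Int)) x = ((d.insert x [i]).keys : PySem.Set (List Int))
        rw [hkeys, PySem.Set.add, if_neg (by simpa [PySem.Set.contains] using hxk')]
    · rw [hins, hkeys]
      refine List.Nodup.append hnd (by simp) ?_
      simp only [List.disjoint_singleton]
      exact hxk'

-- the loop invariant, over the whole enumerated suffix
theorem pv_loop (xs : List (List Int)) (i : Int) (d : PySem.Dict (List Int) (List Int))
    (hnd : d.keys.Nodup) :
    (PySem.List.enumerate xs i).foldl pvStepA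
        (d.items.map (·.1), d.items.map (fun q => ((q.2.length : Int))), d, (d.keys : PySem.Set (List Int)))
      = (((PySem.List.enumerate xs i).foldl pvStepB d).items.map (·.1),
         ((PySem.List.enumerate xs i).foldl pvStepB d).items.map (fun q => ((q.2.length : Int))),
         (PySem.List.enumerate xs i).foldl pvStepB d,
         (((PySem.List.enumerate xs i).foldl pvStepB d).keys : PySem.Set (List Int))) := by
  induction xs generalizing i d with
  | nil => simp [PySem.List.enumerate_nil]
  | cons x tl ih =>
    obtain ⟨hstep, hnd'⟩ := pv_step d hnd i x
    rw [PySem.List.enumerate_cons]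
    simp only [List.foldl_cons]
    rw [hstep]
    exact ih (i + 1) (pvStepB d (i, x)) hnd'

-- ===== VERDICT (by name: the statement is the Claim_ definition above) =====
theorem find_unique_features_spec : Claim_equal_find_unique_features := by
  intro lists _
  unfold Spec_find_unique_features find_unique_features find_unique_features_alt
  have h := pv_loop lists 0 PySem.Dict.empty (by simp [PySem.Dict.keys, PySem.Dict.empty])
  simp only [PySem.Dict.empty, List.map_nil] at h
  exact congrArg (fun r => (r.1, r.2.1, r.2.2.1.items)) h
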